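-- pv_equiv track=rewrite | github.com/CBreazy/arc-agent-proj | arc_agent/utils.py | learn_patterns_from_training
-- ===== SOURCE A (Python) =====
-- def learn_patterns_from_training(grid):
--     """
--     Detects all repeating symbolic patterns from the training input.
--     Returns a list of (start_x, pattern, leading_symbol) tuples.
--     """
--     patterns = []
--     for y, row in enumerate(grid):
--         symbols = [(x, val) for x, val in enumerate(row) if val != 0]
--         if len(symbols) >= 2:
--             # sort by x-position
--             symbols.sort()
--             pattern = []
--             last_x = symbols[0][0]
--             pattern.append(symbols[0][1])
--             for i in range(1, len(symbols)):
--                 gap = symbols[i][0] - last_x - 1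
--                 pattern.extend([0] * gap)
--                 pattern.append(symbols[i][1])
--                 last_x = symbols[i][0]
--             start_x = symbols[0][0]
--             leading = symbols[0][1]
--             patterns.append((start_x, pattern, leading))
--     return patterns
-- ===== SOURCE B (Python) =====
-- def learn_patterns_from_training(grid):
--     """
--     Detects all repeating symbolic patterns from the training input.
--     Returns a list of (start_x, pattern, leading_symbol) tuples.
--     """
--     patterns = []
--     for row in grid:
--         nz = [(x, v) for x, v in enumerate(row) if v != 0]
--         if len(nz) >= 2:
--             start = nz[0][0]
--             end = nz[-1][0]
--             patterns.append((start, row[start:end + 1], nz[0][1]))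
--     return patterns
-- ===== Notes on version B (the rewrite author's own statement) =====
-- stated objective: simpler
-- what changed: Replaces the sort plus incremental gap-padding loop (extend zeros, append symbol, track last_x) with a direct slice row[first:last+1] of the row between its first and last nonzero index, dropping the redundant sort and per-symbol list growth.
import Mathlib
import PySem

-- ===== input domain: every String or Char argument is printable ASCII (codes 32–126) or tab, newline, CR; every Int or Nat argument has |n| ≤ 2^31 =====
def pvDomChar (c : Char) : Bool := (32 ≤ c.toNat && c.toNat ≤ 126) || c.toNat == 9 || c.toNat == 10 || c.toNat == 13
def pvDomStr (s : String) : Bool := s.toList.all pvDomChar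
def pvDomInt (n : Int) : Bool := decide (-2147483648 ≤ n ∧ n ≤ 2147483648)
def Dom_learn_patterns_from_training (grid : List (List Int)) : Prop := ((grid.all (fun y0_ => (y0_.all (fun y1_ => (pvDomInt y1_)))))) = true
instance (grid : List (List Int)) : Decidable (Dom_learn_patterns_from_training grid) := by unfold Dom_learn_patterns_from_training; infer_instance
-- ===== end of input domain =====

-- B replaces A's sort + incremental gap-padding loop by a direct slice of the row
-- between its first and last nonzero index (objective: simpler).

-- ===== PORT A =====
-- Python's `symbols.sort()` compares tuples; since the first components (the x
-- positions) are strictly increasing and the sort is stable, sorting by the first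
-- component is the same comparison here.
def learn_patterns_from_training (grid : List (List Int)) : List (Int × List Int × Int) :=
  grid.foldl (fun patterns row =>
    let symbols := (PySem.List.enumerate row 0).filter (fun p => p.2 != 0)
    if 2 ≤ symbols.length then
      let symbols := PySem.List.sorted symbols (fun p => p.1) false
      let st := (PySem.List.pyRange 1 (PySem.List.len symbols) 1).foldl
        (fun (st : List Int × Int) i =>
          let sym := PySem.List.pyGetD symbols i ((0 : Int), (0 : Int))
          (st.1 ++ List.replicate (sym.1 - st.2 - 1).toNat 0 ++ [sym.2], sym.1))
        ([(PySem.List.pyGetD symbols 0 ((0 : Int), (0 : Int))).2],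
         (PySem.List.pyGetD symbols 0 ((0 : Int), (0 : Int))).1)
      patterns ++ [((PySem.List.pyGetD symbols 0 ((0 : Int), (0 : Int))).1, st.1,
                    (PySem.List.pyGetD symbols 0 ((0 : Int), (0 : Int))).2)]
    else patterns) []

-- ===== PORT B =====
def learn_patterns_from_training_alt (grid : List (List Int)) : List (Int × List Int × Int) :=
  grid.foldl (fun patterns row =>
    let nz := (PySem.List.enumerate row 0).filter (fun p => p.2 != 0)
    if 2 ≤ nz.length then
      let start := (PySem.List.pyGetD nz 0 ((0 : Int), (0 : Int))).1
      let stop := (PySem.List.pyGetD nz (-1) ((0 : Int), (0 : Int))).1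
      patterns ++ [(start, PySem.List.slice row (some start) (some (stop + 1)),
                    (PySem.List.pyGetD nz 0 ((0 : Int), (0 : Int))).2)]
    else patterns) []

-- ===== PRECONDITION & SPEC =====
def Spec_learn_patterns_from_training (grid : List (List Int)) (out : List (Int × List Int × Int)) : Prop := out = learn_patterns_from_training_alt grid
instance (grid : List (List Int)) (out : List (Int × List Int × Int)) : Decidable (Spec_learn_patterns_from_training grid out) := by unfold Spec_learn_patterns_from_training; infer_instance

-- ===== CLAIM (what is proved, stated in full; the proofs are below) =====
def Claim_equal_learn_patterns_from_training : Prop := ∀ (grid : List (List Int)), Dom_learn_patterns_from_training grid → Spec_learn_patterns_from_training grid (learn_patterns_from_training grid)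

-- ===== LEMMAS AND PROOFS =====

-- A's gap-padding loop, abstracted over the remaining symbols: last_x starts at lx.
def pvRecon (lx : Int) : List (Int × Int) → List Int
  | [] => []
  | (x, v) :: t => List.replicate (x - lx - 1).toNat 0 ++ v :: pvRecon x t

-- x-position of the last symbol (lx if there is none).
def pvLastFst (lx : Int) : List (Int × Int) → Int
  | [] => lx
  | (x, _) :: t => pvLastFst x t

theorem pvLastFst_mem_or (l : List (Int × Int)) (c : Int) :
    pvLastFst c l = c ∨ ∃ p ∈ l, pvLastFst c l = p.1 := by
  induction l generalizing c with
  | nil => exact Or.inl rfl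
  | cons p t ih =>
    obtain ⟨x, v⟩ := p
    rcases ih x with h | ⟨q, hq, hEq⟩
    · exact Or.inr ⟨(x, v), List.mem_cons_self .., by simp [pvLastFst, h]⟩
    · exact Or.inr ⟨q, List.mem_cons_of_mem _ hq, by simp [pvLastFst, hEq]⟩

theorem pv_mem_filterEnum_fst_ge (t : List Int) (b : Int) (p : Int × Int)
    (hp : p ∈ (PySem.List.enumerate t b).filter (fun p => p.2 != 0)) : b ≤ p.1 := by
  have hmem := List.mem_of_mem_filter hp
  rw [PySem.List.mem_enumerate_iff] at hmem
  obtain ⟨k, hk, rfl⟩ := hmem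
  show b ≤ b + (k : Int)
  omega

theorem pvLastFst_ge_of_all (l : List (Int × Int)) (c : Int)
    (h : ∀ p ∈ l, c ≤ p.1) : c ≤ pvLastFst c l := by
  rcases pvLastFst_mem_or l c with hEq | ⟨p, hp, hEq⟩
  · omega
  · rw [hEq]; exact h p hp

-- A's loop as a fold produces (accumulated pattern, final last_x).
theorem pv_foldl_recon (l : List (Int × Int)) (pat : List Int) (lx : Int) :
    l.foldl (fun (st : List Int × Int) (sym : Int × Int) =>
        (st.1 ++ List.replicate (sym.1 - st.2 - 1).toNat 0 ++ [sym.2], sym.1)) (pat, lx)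
      = (pat ++ pvRecon lx l, pvLastFst lx l) := by
  induction l generalizing pat lx with
  | nil => simp [pvRecon, pvLastFst]
  | cons p t ih =>
    obtain ⟨x, v⟩ := p
    rw [List.foldl_cons]
    show List.foldl _ (pat ++ List.replicate (x - lx - 1).toNat 0 ++ [v], x) t = _
    rw [ih]
    simp [pvRecon, pvLastFst]

-- Reconstructing from the nonzero symbols of t (indexed from b+1), with last_x = b,
-- is taking t up to its last nonzero position.
theorem pv_recon_eq_take (t : List Int) (b : Int) :
    pvRecon b ((PySem.List.enumerate t (b + 1)).filter (fun p => p.2 != 0))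
      = t.take ((pvLastFst b ((PySem.List.enumerate t (b + 1)).filter (fun p => p.2 != 0)) - b)).toNat := by
  induction t generalizing b with
  | nil => simp [PySem.List.enumerate_nil, pvRecon, pvLastFst]
  | cons h t ih =>
    rw [PySem.List.enumerate_cons]
    by_cases hz : h = 0
    · subst hz
      simp only [List.filter_cons, bne_self_eq_false, Bool.false_eq_true, if_false]
      cases hcl : (PySem.List.enumerate t (b + 1 + 1)).filter (fun p => p.2 != 0) with
      | nil => simp [pvRecon, pvLastFst]
      | cons q l' =>
        obtain ⟨x1, v1⟩ := q
        have hx1 : b + 1 + 1 ≤ x1 := by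
          have := pv_mem_filterEnum_fst_ge t (b + 1 + 1) (x1, v1) (by rw [hcl]; exact List.mem_cons_self ..)
          simpa using this
        have hpl : ((x1, v1) :: l').Pairwise (fun a b => a.1 < b.1) := by
          rw [← hcl]
          exact (PySem.List.pairwise_lt_enumerate t (b + 1 + 1)).filter _
        have hlast : x1 ≤ pvLastFst x1 l' :=
          pvLastFst_ge_of_all _ _ (fun p hp => le_of_lt ((List.pairwise_cons.mp hpl).1 p hp))
        have ihb := ih (b + 1)
        rw [hcl] at ihb
        simp only [pvRecon, pvLastFst] at ihb ⊢
        rw [show (x1 - b - 1).toNat = (x1 - (b + 1) - 1).toNat + 1 by omega,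
            List.replicate_succ, List.cons_append,
            show (pvLastFst x1 l' - b).toNat = (pvLastFst x1 l' - (b + 1)).toNat + 1 by omega,
            List.take_succ_cons]
        exact congrArg (0 :: ·) ihb
    · have hbq : (h != 0) = true := by simpa using hz
      simp only [List.filter_cons, hbq, if_true]
      simp only [pvRecon, pvLastFst]
      have hlast : b + 1 ≤ pvLastFst (b + 1) ((PySem.List.enumerate t (b + 1 + 1)).filter (fun p => p.2 != 0)) := by
        apply pvLastFst_ge_of_all
        intro p hp
        have := pv_mem_filterEnum_fst_ge t (b + 1 + 1) p hp
        omega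
      rw [show ((b : Int) + 1 - b - 1).toNat = 0 by omega, List.replicate_zero, List.nil_append,
          show (pvLastFst (b + 1) ((PySem.List.enumerate t (b + 1 + 1)).filter (fun p => p.2 != 0)) - b).toNat
             = (pvLastFst (b + 1) ((PySem.List.enumerate t (b + 1 + 1)).filter (fun p => p.2 != 0)) - (b + 1)).toNat + 1 by omega,
          List.take_succ_cons]
      exact congrArg (h :: ·) (ih (b + 1))

-- The head symbol's pattern: v0 followed by the reconstruction equals the slice of row.
theorem pv_head_recon_eq_segment (row : List Int) (b : Int) (hb : 0 ≤ b)
    (x0 v0 : Int) (rest : List (Int × Int))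
    (h : (PySem.List.enumerate row b).filter (fun p => p.2 != 0) = (x0, v0) :: rest) :
    v0 :: pvRecon x0 rest
      = (row.drop (x0 - b).toNat).take ((pvLastFst x0 rest - x0).toNat + 1) := by
  induction row generalizing b with
  | nil => simp [PySem.List.enumerate_nil] at h
  | cons hd t ih =>
    rw [PySem.List.enumerate_cons] at h
    by_cases hz : hd = 0
    · subst hz
      simp only [List.filter_cons, bne_self_eq_false, Bool.false_eq_true, if_false] at h
      have hx0 : b + 1 ≤ x0 := by
        have := pv_mem_filterEnum_fst_ge t (b + 1) (x0, v0) (by rw [h]; exact List.mem_cons_self ..)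
        simpa using this
      have := ih (b + 1) (by omega) h
      rw [show (x0 - b).toNat = (x0 - (b + 1)).toNat + 1 by omega]
      simpa using this
    · have hbq : (hd != 0) = true := by simpa using hz
      simp only [List.filter_cons, hbq, if_true, List.cons.injEq, Prod.mk.injEq] at h
      obtain ⟨⟨hx, hv⟩, hrest⟩ := h
      subst hv; subst hrest
      rw [← hx, show (b - b).toNat = 0 by omega]
      simp only [List.drop_zero, List.take_succ_cons]
      exact congrArg (hd :: ·) (pv_recon_eq_take t b)

-- ===== VERDICT (by name: the statement is the Claim_ definition above) =====
theorem learn_patterns_from_training_spec : Claim_equal_learn_patterns_from_training := by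
  unfold Claim_equal_learn_patterns_from_training
  intro grid _
  unfold Spec_learn_patterns_from_training learn_patterns_from_training learn_patterns_from_training_alt
  congr 1
  funext patterns row
  set nz := (PySem.List.enumerate row 0).filter (fun p => p.2 != 0) with hnz
  by_cases hlen : 2 ≤ nz.length
  · simp only [if_pos hlen]
    have hpair : nz.Pairwise (fun a b => a.1 < b.1) :=
      (PySem.List.pairwise_lt_enumerate row 0).filter _
    have hsorted : PySem.List.sorted nz (fun p => p.1) false = nz :=
      PySem.List.sorted_eq_self_of_pairwise nz (fun p => p.1) (hpair.imp le_of_lt)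
    rw [hsorted]
    cases hc : nz with
    | nil => simp [hc] at hlen
    | cons p rest =>
      obtain ⟨x0, v0⟩ := p
      have hx0 : 0 ≤ x0 := by
        have := pv_mem_filterEnum_fst_ge row 0 (x0, v0) (by rw [← hnz, hc]; exact List.mem_cons_self ..)
        simpa using this
      have hrest : ∀ q ∈ rest, x0 < q.1 := by
        intro q hq
        have hp2 := hpair
        rw [hc] at hp2
        exact (List.pairwise_cons.mp hp2).1 q hq
      have hlastge : x0 ≤ pvLastFst x0 rest :=
        pvLastFst_ge_of_all _ _ (fun q hq => le_of_lt (hrest q hq))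
      rw [PySem.List.len_eq,
          PySem.List.foldl_pyRange_pyGetD' ((x0, v0) :: rest) ((0 : Int), (0 : Int))
            (fun (st : List Int × Int) (sym : Int × Int) =>
              (st.1 ++ List.replicate (sym.1 - st.2 - 1).toNat 0 ++ [sym.2], sym.1)) _ (by omega)]
      simp only [PySem.List.pyGetD_zero_cons, Int.toNat_one, List.drop_one, List.tail_cons]
      rw [pv_foldl_recon]
      have hne : ((x0, v0) :: rest) ≠ [] := by simp
      rw [PySem.List.pyGetD_neg_one _ ((0 : Int), (0 : Int)) hne]
      have hgl : (((x0, v0) :: rest).getLast hne).1 = pvLastFst x0 rest := by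
        clear hrest hlastge hc hx0
        induction rest generalizing x0 v0 with
        | nil => simp [pvLastFst]
        | cons q t ih =>
          obtain ⟨x1, v1⟩ := q
          rw [List.getLast_cons (by simp)]
          exact ih x1 v1 (List.cons_ne_nil _ _)
      rw [hgl, PySem.List.slice_toNat row hx0 (by omega)]
      have hseg := pv_head_recon_eq_segment row 0 le_rfl x0 v0 rest (by rw [← hnz, hc])
      rw [show ((pvLastFst x0 rest + 1).toNat - x0.toNat) = (pvLastFst x0 rest - x0).toNat + 1 by omega,
          show (x0 : Int) - 0 = x0 from by ring] at *
      rw [← hseg]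
      simp
  · rw [if_neg hlen, if_neg hlen]
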